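-- pv_equiv track=rewrite | github.com/gnueaj/SAE_vis | backend/app/services/rule_evaluators.py | _find_matching_child
-- ===== SOURCE A (Python) =====
-- from typing import Dict, Any, Optional, Tuple, List
--
-- def _find_matching_child(
--
--     pattern_child_id: str,
--     children_ids: List[str]
-- ) -> Optional[str]:
--     """
--     Find child that matches pattern, regardless of hierarchy position.
--
--     Handles:
--     - Exact matches (backward compatibility)
--     - Suffix matches (score agreement at end)
--     - Component matches (score agreement in middle/beginning)
--
--     Args:
--         pattern_child_id: The pattern's child_id (e.g., '2_of_3_high_fuzz_det')
--         children_ids: List of actual child node IDs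
--
--     Returns:
--         Matching child ID or None if not found
--     """
--     # First try exact match (fastest and most reliable)
--     if pattern_child_id in children_ids:
--         return pattern_child_id
--
--     # Then try suffix match (for current hierarchy where score is at end)
--     for child_id in children_ids:
--         if child_id.endswith(pattern_child_id) or child_id.endswith('_' + pattern_child_id):
--             return child_id
--
--     # Then try component-based matching (for score agreement in middle/beginning)
--     pattern_parts = pattern_child_id.split('_')
--
--     for child_id in children_ids:
--         child_parts = child_id.split('_')
--
--         # Check if pattern parts appear consecutively in child parts
--         # This handles cases like:
--         # pattern: '2_of_3_high_fuzz_det'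
--         # child: 'root_2_of_3_high_fuzz_det_split_true_semsim_high'
--         for i in range(len(child_parts) - len(pattern_parts) + 1):
--             if child_parts[i:i+len(pattern_parts)] == pattern_parts:
--                 return child_id
--
--     # No match found
--     return None
-- ===== SOURCE B (Python) =====
-- from typing import Optional, List
--
--
-- def _find_matching_child(
--     pattern_child_id: str,
--     children_ids: List[str]
-- ) -> Optional[str]:
--     # Single pass: check all three tiers per child, never return early,
--     # then resolve by tier priority (exact > first suffix > first component).
--     pattern_parts = pattern_child_id.split('_')
--     exact = False
--     suffix_hit = None
--     comp_hit = None
--     for child_id in children_ids: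
--         if child_id == pattern_child_id:
--             exact = True
--         if suffix_hit is None and (child_id.endswith(pattern_child_id)
--                                    or child_id.endswith('_' + pattern_child_id)):
--             suffix_hit = child_id
--         if comp_hit is None:
--             child_parts = child_id.split('_')
--             for i in range(len(child_parts) - len(pattern_parts) + 1):
--                 if child_parts[i:i+len(pattern_parts)] == pattern_parts:
--                     comp_hit = child_id
--                     break
--     if exact:
--         return pattern_child_id
--     if suffix_hit is not None:
--         return suffix_hit
--     return comp_hit
-- ===== Notes on version B (the rewrite author's own statement) =====
-- stated objective: alternative
-- what changed: Replaced A's three sequential scans (membership test, suffix loop, component loop) by one loop over children_ids that records the exact flag and the first suffix and first component hits, resolving tier priority after the loop.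
import Mathlib
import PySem

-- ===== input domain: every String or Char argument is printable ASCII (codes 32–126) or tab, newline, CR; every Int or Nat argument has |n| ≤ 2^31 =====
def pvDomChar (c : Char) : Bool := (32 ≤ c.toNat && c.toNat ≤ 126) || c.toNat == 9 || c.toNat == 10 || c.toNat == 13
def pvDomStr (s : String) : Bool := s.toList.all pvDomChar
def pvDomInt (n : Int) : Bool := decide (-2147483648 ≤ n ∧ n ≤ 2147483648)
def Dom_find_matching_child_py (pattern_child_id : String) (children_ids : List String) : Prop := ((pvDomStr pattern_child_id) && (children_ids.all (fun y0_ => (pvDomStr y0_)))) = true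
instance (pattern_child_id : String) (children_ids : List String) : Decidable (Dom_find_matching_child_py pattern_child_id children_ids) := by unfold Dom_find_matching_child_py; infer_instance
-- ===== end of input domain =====

-- B rewrites A's three sequential scans as one loop recording per-tier first hits; objective: alternative (same cost, single pass).

-- ===== PORT A =====
-- Shared check helpers: the suffix test and the split-based consecutive-component
-- test are byte-for-byte identical pieces of code in both Pythons.
def pvSuffixOk (pattern_child_id child_id : String) : Bool :=
  PySem.Str.endswith child_id pattern_child_id ||
  PySem.Str.endswith child_id ("_" ++ pattern_child_id)

-- child_parts inner loop: range(len(child_parts) - len(pattern_parts) + 1), slice compare.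
-- split('_') with nonempty separator always returns some, so .getD [] is exact.
def pvCompOk (pattern_child_id child_id : String) : Bool :=
  let pattern_parts := (PySem.Str.split? pattern_child_id "_").getD []
  let child_parts := (PySem.Str.split? child_id "_").getD []
  (PySem.List.pyRange 0 ((child_parts.length : Int) - (pattern_parts.length : Int) + 1) 1).any
    (fun i => PySem.List.slice child_parts (some i) (some (i + (pattern_parts.length : Int))) == pattern_parts)

def find_matching_child_py (pattern_child_id : String) (children_ids : List String) : Option String :=
  if pattern_child_id ∈ children_ids then some pattern_child_id
  else
    match children_ids.find? (fun child_id => pvSuffixOk pattern_child_id child_id) with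
    | some child_id => some child_id
    | none => children_ids.find? (fun child_id => pvCompOk pattern_child_id child_id)

-- ===== PORT B =====
-- one step of B's single loop: state = (exact flag, first suffix hit, first component hit)
def pvStep (pattern_child_id : String) (st : Bool × Option String × Option String)
    (child_id : String) : Bool × Option String × Option String :=
  let exact := st.1 || (child_id == pattern_child_id)
  let suffix_hit :=
    match st.2.1 with
    | some x => some x
    | none => if pvSuffixOk pattern_child_id child_id then some child_id else none
  let comp_hit :=
    match st.2.2 with
    | some x => some x
    | none => if pvCompOk pattern_child_id child_id then some child_id else none
  (exact, suffix_hit, comp_hit)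

def find_matching_child_py_alt (pattern_child_id : String) (children_ids : List String) : Option String :=
  let st := children_ids.foldl (pvStep pattern_child_id) (false, none, none)
  if st.1 then some pattern_child_id
  else
    match st.2.1 with
    | some s => some s
    | none => st.2.2

-- ===== PRECONDITION & SPEC =====
def Spec_find_matching_child_py (pattern_child_id : String) (children_ids : List String) (out : Option String) : Prop := out = find_matching_child_py_alt pattern_child_id children_ids
instance (pattern_child_id : String) (children_ids : List String) (out : Option String) : Decidable (Spec_find_matching_child_py pattern_child_id children_ids out) := by unfold Spec_find_matching_child_py; infer_instance

-- ===== CLAIM (what is proved, stated in full; the proofs are below) =====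
def Claim_equal_find_matching_child_py : Prop := ∀ (pattern_child_id : String) (children_ids : List String), Dom_find_matching_child_py pattern_child_id children_ids → Spec_find_matching_child_py pattern_child_id children_ids (find_matching_child_py pattern_child_id children_ids)

-- ===== LEMMAS AND PROOFS =====

-- The fold's invariant: exact flag is an 'any', each hit slot is 'previous value or first find?'.
theorem pvFold_eq (p : String) (cs : List String) (e : Bool) (s m : Option String) :
    cs.foldl (pvStep p) (e, s, m) =
      (e || cs.any (fun c => c == p),
       s.or (cs.find? (fun c => pvSuffixOk p c)),
       m.or (cs.find? (fun c => pvCompOk p c))) := by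
  induction cs generalizing e s m with
  | nil => simp
  | cons c cs ih =>
    simp only [List.foldl_cons, List.any_cons, List.find?_cons]
    rw [ih]
    cases s <;> cases m <;>
      simp [pvStep, Option.or, Bool.or_assoc] <;>
      split_ifs <;> simp_all

theorem find_matching_child_py_spec' (p : String) (cs : List String) :
    find_matching_child_py p cs = find_matching_child_py_alt p cs := by
  unfold find_matching_child_py find_matching_child_py_alt
  rw [pvFold_eq]
  simp only [Bool.false_or, Option.or]
  by_cases h : p ∈ cs
  · have : cs.any (fun c => c == p) = true :=
      List.any_eq_true.2 ⟨p, h, by simp⟩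
    simp [h, this]
  · have : cs.any (fun c => c == p) = false := by
      simp [List.any_eq_false]
      intro x hx hxp; exact h (hxp ▸ hx)
    simp [h, this]

-- ===== VERDICT (by name: the statement is the Claim_ definition above) =====
theorem find_matching_child_py_spec : Claim_equal_find_matching_child_py := by
  intro p cs _
  exact find_matching_child_py_spec' p cs
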